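-- pv_equiv track=rewrite | github.com/ROBROICH/bundestag-rag-public | src/chat/app.py | _extract_section_from_text
-- ===== SOURCE A (Python) =====
-- from typing import Optional
--
-- def _extract_section_from_text(full_text: str, keywords: list[str],
--                                context_chars: int = 3000) -> Optional[str]:
--     """Extract a relevant section from a large compiled document.
--
--     Uses a scoring approach: finds all keyword positions, clusters them to
--     find the region where the most keywords appear close together, then
--     expands to paragraph boundaries.
--     """
--     if not keywords:
--         return None
--
--     text_lower = full_text.lower()
--
--     # Find all match positions for each keyword
--     positions = []
--     for kw in keywords:
--         kw_lower = kw.lower()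
--         pos = text_lower.find(kw_lower)
--         while pos >= 0:
--             positions.append((pos, kw))
--             pos = text_lower.find(kw_lower, pos + 1)
--
--     if not positions:
--         return None
--
--     positions.sort(key=lambda x: x[0])
--
--     # Sliding window: find the region with the highest keyword density
--     # (most unique keywords within a window)
--     window_size = context_chars
--     best_score = 0
--     best_center = positions[0][0]
--
--     for anchor_pos, _ in positions:
--         window_kws = set()
--         for pos, kw in positions:
--             if anchor_pos <= pos <= anchor_pos + window_size:
--                 window_kws.add(kw.lower())
--         score = len(window_kws)
--         if score > best_score:
--             best_score = score
--             # Center on the middle of the matching region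
--             matching_positions = [p for p, k in positions if anchor_pos <= p <= anchor_pos + window_size]
--             best_center = (min(matching_positions) + max(matching_positions)) // 2
--
--     # Require at least 2 keyword matches for compiled documents
--     if best_score < 2 and len(keywords) >= 3:
--         return None
--
--     # Expand to paragraph boundaries around the best center
--     start = max(0, best_center - context_chars // 2)
--     end = min(len(full_text), best_center + context_chars // 2)
--
--     para_start = full_text.rfind("\n\n", start, best_center)
--     if para_start > start:
--         start = para_start + 2
--
--     para_end = full_text.find("\n\n", best_center + 100, end + context_chars)
--     if para_end > 0:
--         end = para_end
--
--     return full_text[start:end].strip()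
-- ===== SOURCE B (Python) =====
-- from typing import Optional
--
--
-- def _extract_section_from_text(full_text: str, keywords: list[str],
--                                context_chars: int = 3000) -> Optional[str]:
--     """Same result as A, but the densest-window search uses binary search on the
--     sorted position list: for each anchor the in-window matches form a contiguous
--     slice located in O(log m), instead of A's two full scans of all positions."""
--     if not keywords:
--         return None
--
--     text_lower = full_text.lower()
--
--     positions = []
--     for kw in keywords:
--         kw_lower = kw.lower()
--         pos = text_lower.find(kw_lower)
--         while pos >= 0:
--             positions.append((pos, kw))
--             pos = text_lower.find(kw_lower, pos + 1)
--
--     if not positions: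
--         return None
--
--     positions.sort(key=lambda x: x[0])
--     pos_list = [p for p, _ in positions]
--     m = len(pos_list)
--
--     def lower_bound(v):  # first index i with pos_list[i] >= v
--         lo, hi = 0, m
--         while lo < hi:
--             mid = (lo + hi) // 2
--             if pos_list[mid] < v:
--                 lo = mid + 1
--             else:
--                 hi = mid
--         return lo
--
--     def upper_bound(v):  # first index i with pos_list[i] > v
--         lo, hi = 0, m
--         while lo < hi:
--             mid = (lo + hi) // 2
--             if pos_list[mid] <= v:
--                 lo = mid + 1
--             else:
--                 hi = mid
--         return lo
--
--     best_score = 0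
--     best_center = positions[0][0]
--
--     for anchor_pos, _ in positions:
--         lo = lower_bound(anchor_pos)
--         hi = upper_bound(anchor_pos + context_chars)
--         score = len({kw.lower() for _, kw in positions[lo:hi]})
--         if score > best_score:
--             best_score = score
--             best_center = (pos_list[lo] + pos_list[hi - 1]) // 2
--
--     if best_score < 2 and len(keywords) >= 3:
--         return None
--
--     start = max(0, best_center - context_chars // 2)
--     end = min(len(full_text), best_center + context_chars // 2)
--
--     para_start = full_text.rfind("\n\n", start, best_center)
--     if para_start > start:
--         start = para_start + 2
--
--     para_end = full_text.find("\n\n", best_center + 100, end + context_chars)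
--     if para_end > 0:
--         end = para_end
--
--     return full_text[start:end].strip()
-- ===== Notes on version B (the rewrite author's own statement) =====
-- stated objective: faster
-- what changed: The densest-window search no longer rescans the whole position list twice per anchor: positions are sorted, so B locates each anchor's in-window matches as a contiguous slice via two hand-written binary searches and reads min/max directly from the slice ends.
import Mathlib
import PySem

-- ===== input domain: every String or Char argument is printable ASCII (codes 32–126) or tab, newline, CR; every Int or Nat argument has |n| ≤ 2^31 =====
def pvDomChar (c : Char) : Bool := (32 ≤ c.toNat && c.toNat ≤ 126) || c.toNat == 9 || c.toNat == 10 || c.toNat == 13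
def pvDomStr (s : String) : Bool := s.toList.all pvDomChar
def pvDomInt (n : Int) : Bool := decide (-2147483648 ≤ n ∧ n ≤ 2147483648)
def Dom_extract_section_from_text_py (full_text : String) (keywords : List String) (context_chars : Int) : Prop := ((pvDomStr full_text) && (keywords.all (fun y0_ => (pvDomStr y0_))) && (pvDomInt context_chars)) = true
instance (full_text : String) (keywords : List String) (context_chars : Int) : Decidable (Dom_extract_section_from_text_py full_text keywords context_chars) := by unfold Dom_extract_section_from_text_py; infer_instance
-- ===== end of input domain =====

-- B replaces A's quadratic densest-window search (two full scans of all match positions per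
-- anchor) by binary search on the sorted position list: the in-window matches are a contiguous
-- slice. Both programs share the position-collection and paragraph-expansion code, ported once
-- in the shared helpers pvFindAll/pvPositions/pvTail (identical lines in both Python sources).

-- ===== PORT A =====
-- the 'pos = find(...); while pos >= 0: append; pos = find(..., pos+1)' loop of both Pythons.
-- fuel: each iteration strictly increases pos, and 0 ≤ pos ≤ len(tl), so there are at most
-- tl.length + 1 iterations; fuel tl.length + 2 is never exhausted.
def pvFindAll (tl kwl : List Char) (kw : String) (pos : Int) (fuel : Nat) : List (Int × String) :=
  match fuel with
  | 0 => []
  | fuel + 1 =>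
    if 0 ≤ pos then
      (pos, kw) :: pvFindAll tl kwl kw (PySem.Chars.findFrom tl kwl (pos + 1) none) fuel
    else []

-- the 'for kw in keywords: ...' position-collection loop (identical in A and B)
def pvPositions (tl : List Char) (keywords : List String) : List (Int × String) :=
  keywords.foldl (fun acc kw =>
    let kwl := PySem.Chars.lower kw.toList
    acc ++ pvFindAll tl kwl kw (PySem.Chars.find tl kwl) (tl.length + 2)) []

-- everything after the best-window loop (identical in A and B)
def pvTail (full_text : String) (keywords : List String) (context_chars best_score best_center : Int) : Option String :=
  if best_score < 2 ∧ 3 ≤ (keywords.length : Int) then none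
  else
    let start := max 0 (best_center - PySem.Int.floordiv context_chars 2)
    let stop := min (PySem.Str.len full_text) (best_center + PySem.Int.floordiv context_chars 2)
    let para_start := PySem.Str.rfindFrom full_text "\n\n" start (some best_center)
    let start := if para_start > start then para_start + 2 else start
    let para_end := PySem.Str.findFrom full_text "\n\n" (best_center + 100) (some (stop + context_chars))
    let stop := if para_end > 0 then para_end else stop
    some (PySem.Str.strip (PySem.Str.slice full_text (some start) (some stop)))

-- one iteration of A's 'for anchor_pos, _ in positions' loop: two full scans of positions
def pvStepA (positions : List (Int × String)) (w : Int) (st : Int × Int) (a : Int) : Int × Int :=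
  let windowKws := positions.foldl
    (fun s q => if a ≤ q.1 ∧ q.1 ≤ a + w then PySem.Set.add s (PySem.Str.lower q.2) else s)
    PySem.Set.empty
  let score : Int := windowKws.length
  if score > st.1 then
    let matching := positions.foldl
      (fun acc q => if a ≤ q.1 ∧ q.1 ≤ a + w then acc ++ [q.1] else acc) ([] : List Int)
    -- Python's min/max: matching is non-empty here (score ≥ 1), so the getD defaults are unreachable
    (score, PySem.Int.floordiv ((PySem.List.min? matching (fun x => x)).getD 0 +
                                (PySem.List.max? matching (fun x => x)).getD 0) 2)
  else st

def extract_section_from_text_py (full_text : String) (keywords : List String) (context_chars : Int) : Option String :=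
  if keywords = [] then none
  else
    let text_lower := PySem.Chars.lower full_text.toList
    let positions := pvPositions text_lower keywords
    if positions = [] then none
    else
      let positions := PySem.List.sorted positions (fun x => x.1) false
      -- positions[0][0]: positions is non-empty here, the headD default is unreachable
      let best := positions.foldl (fun st q => pvStepA positions context_chars st q.1)
        (0, (positions.headD (0, "")).1)
      pvTail full_text keywords context_chars best.1 best.2

-- ===== PORT B =====
-- B's hand-written binary searches over pos_list (lo, hi, mid are non-negative Python ints,
-- so Nat with Nat division is exact; mid < hi ≤ m keeps pos_list[mid] in range, getD 0 unreachable)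
def pvLB (pl : List Int) (v : Int) (lo hi : Nat) : Nat :=
  if _h : lo < hi then
    if pl.getD ((lo + hi) / 2) 0 < v then pvLB pl v ((lo + hi) / 2 + 1) hi
    else pvLB pl v lo ((lo + hi) / 2)
  else lo
termination_by hi - lo
decreasing_by all_goals omega

def pvUB (pl : List Int) (v : Int) (lo hi : Nat) : Nat :=
  if _h : lo < hi then
    if pl.getD ((lo + hi) / 2) 0 ≤ v then pvUB pl v ((lo + hi) / 2 + 1) hi
    else pvUB pl v lo ((lo + hi) / 2)
  else lo
termination_by hi - lo
decreasing_by all_goals omega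

-- one iteration of B's loop: two binary searches, then the contiguous slice positions[lo:hi]
def pvStepB (positions : List (Int × String)) (posList : List Int) (m : Nat) (w : Int)
    (st : Int × Int) (a : Int) : Int × Int :=
  let lo := pvLB posList a 0 m
  let hi := pvUB posList (a + w) 0 m
  let score : Int := (PySem.Set.ofList
    ((PySem.List.slice positions (some (lo : Int)) (some (hi : Int))).map
      (fun q => PySem.Str.lower q.2))).length
  if score > st.1 then
    -- pos_list[lo] / pos_list[hi-1]: in range here (score ≥ 1 forces lo < hi ≤ m), getD 0 unreachable
    (score, PySem.Int.floordiv (posList.getD lo 0 + posList.getD (hi - 1) 0) 2)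
  else st

def extract_section_from_text_py_alt (full_text : String) (keywords : List String) (context_chars : Int) : Option String :=
  if keywords = [] then none
  else
    let text_lower := PySem.Chars.lower full_text.toList
    let positions := pvPositions text_lower keywords
    if positions = [] then none
    else
      let positions := PySem.List.sorted positions (fun x => x.1) false
      let posList := positions.map (fun q => q.1)
      let m := posList.length
      let best := positions.foldl (fun st q => pvStepB positions posList m context_chars st q.1)
        (0, (positions.headD (0, "")).1)
      pvTail full_text keywords context_chars best.1 best.2

-- ===== PRECONDITION & SPEC =====
def Spec_extract_section_from_text_py (full_text : String) (keywords : List String) (context_chars : Int) (out : Option String) : Prop := out = extract_section_from_text_py_alt full_text keywords context_chars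
instance (full_text : String) (keywords : List String) (context_chars : Int) (out : Option String) : Decidable (Spec_extract_section_from_text_py full_text keywords context_chars out) := by unfold Spec_extract_section_from_text_py; infer_instance

-- ===== CLAIM (what is proved, stated in full; the proofs are below) =====
def Claim_equal_extract_section_from_text_py : Prop := ∀ (full_text : String) (keywords : List String) (context_chars : Int), Dom_extract_section_from_text_py full_text keywords context_chars → Spec_extract_section_from_text_py full_text keywords context_chars (extract_section_from_text_py full_text keywords context_chars)

-- ===== LEMMAS AND PROOFS =====

-- On a non-decreasing list, a downward-closed test holds exactly on the first countP positions.
lemma pv_sorted_test_iff (pl : List Int) (t : Int → Bool)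
    (hmono : ∀ x y : Int, x ≤ y → t y = true → t x = true)
    (hs : List.Pairwise (fun a b : Int => a ≤ b) pl) :
    ∀ i (h : i < pl.length), (t pl[i] = true ↔ i < pl.countP t) := by
  induction pl with
  | nil => intro i h; simp at h
  | cons x tl ih =>
    rcases List.pairwise_cons.mp hs with ⟨hx, htl⟩
    intro i h
    rw [List.countP_cons]
    by_cases hxt : t x = true
    · cases i with
      | zero => simp [hxt]
      | succ j =>
        have hj : j < tl.length := by simpa using h
        have hIH := ih htl j hj
        simp only [List.getElem_cons_succ]
        rw [hIH]
        have hone : (if t x = true then 1 else 0) = 1 := by simp [hxt]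
        rw [hone]
        omega
    · have hz : tl.countP t = 0 :=
        List.countP_eq_zero.mpr (fun y hy hty => hxt (hmono x y (hx y hy) hty))
      cases i with
      | zero => simp [hxt, hz]
      | succ j =>
        have hj : j < tl.length := by simpa using h
        have hty : ¬ t tl[j] = true :=
          fun hty => hxt (hmono x _ (hx _ (List.getElem_mem hj)) hty)
        simp only [List.getElem_cons_succ]
        simp [hxt, hz, hty]

lemma pvLB_aux (pl : List Int) (v : Int) (c : Nat)
    (hchar : ∀ i (h : i < pl.length), (pl[i] < v ↔ i < c)) :
    ∀ (k lo hi : Nat), hi - lo ≤ k → lo ≤ c → c ≤ hi → hi ≤ pl.length → pvLB pl v lo hi = c := by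
  intro k
  induction k with
  | zero =>
    intro lo hi hk hlo hhi hlen
    rw [pvLB]
    have h : ¬ lo < hi := by omega
    simp only [h, dif_neg, not_false_iff]
    omega
  | succ k ih =>
    intro lo hi hk hlo hhi hlen
    rw [pvLB]
    by_cases h : lo < hi
    · simp only [h, dif_pos]
      have hmid : (lo + hi) / 2 < pl.length := by omega
      rw [List.getD_eq_getElem pl 0 hmid]
      by_cases hlt : pl[(lo + hi) / 2] < v
      · rw [if_pos hlt]
        have hmc : (lo + hi) / 2 < c := (hchar _ hmid).mp hlt
        exact ih _ _ (by omega) (by omega) hhi hlen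
      · rw [if_neg hlt]
        have hcm : c ≤ (lo + hi) / 2 := by
          by_contra hc
          exact hlt ((hchar _ hmid).mpr (by omega))
        exact ih _ _ (by omega) hlo hcm (by omega)
    · simp only [h, dif_neg, not_false_iff]
      omega

lemma pvUB_aux (pl : List Int) (v : Int) (c : Nat)
    (hchar : ∀ i (h : i < pl.length), (pl[i] ≤ v ↔ i < c)) :
    ∀ (k lo hi : Nat), hi - lo ≤ k → lo ≤ c → c ≤ hi → hi ≤ pl.length → pvUB pl v lo hi = c := by
  intro k
  induction k with
  | zero =>
    intro lo hi hk hlo hhi hlen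
    rw [pvUB]
    have h : ¬ lo < hi := by omega
    simp only [h, dif_neg, not_false_iff]
    omega
  | succ k ih =>
    intro lo hi hk hlo hhi hlen
    rw [pvUB]
    by_cases h : lo < hi
    · simp only [h, dif_pos]
      have hmid : (lo + hi) / 2 < pl.length := by omega
      rw [List.getD_eq_getElem pl 0 hmid]
      by_cases hlt : pl[(lo + hi) / 2] ≤ v
      · rw [if_pos hlt]
        have hmc : (lo + hi) / 2 < c := (hchar _ hmid).mp hlt
        exact ih _ _ (by omega) (by omega) hhi hlen
      · rw [if_neg hlt]
        have hcm : c ≤ (lo + hi) / 2 := by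
          by_contra hc
          exact hlt ((hchar _ hmid).mpr (by omega))
        exact ih _ _ (by omega) hlo hcm (by omega)
    · simp only [h, dif_neg, not_false_iff]
      omega

lemma pvLB_eq (pl : List Int) (v : Int) (hs : List.Pairwise (fun a b : Int => a ≤ b) pl) :
    pvLB pl v 0 pl.length = pl.countP (fun x => decide (x < v)) := by
  have hchar : ∀ i (h : i < pl.length), (pl[i] < v ↔ i < pl.countP (fun x => decide (x < v))) := by
    intro i h
    have := pv_sorted_test_iff pl (fun x => decide (x < v))
      (fun x y hxy hy => by simp only [decide_eq_true_eq] at *; omega) hs i h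
    simpa using this
  exact pvLB_aux pl v _ hchar pl.length 0 pl.length (by omega) (Nat.zero_le _)
    List.countP_le_length le_rfl

lemma pvUB_eq (pl : List Int) (v : Int) (hs : List.Pairwise (fun a b : Int => a ≤ b) pl) :
    pvUB pl v 0 pl.length = pl.countP (fun x => decide (x ≤ v)) := by
  have hchar : ∀ i (h : i < pl.length), (pl[i] ≤ v ↔ i < pl.countP (fun x => decide (x ≤ v))) := by
    intro i h
    have := pv_sorted_test_iff pl (fun x => decide (x ≤ v))
      (fun x y hxy hy => by simp only [decide_eq_true_eq] at *; omega) hs i h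
    simpa using this
  exact pvUB_aux pl v _ hchar pl.length 0 pl.length (by omega) (Nat.zero_le _)
    List.countP_le_length le_rfl

-- On a list sorted by first component, the in-window elements form the contiguous slice
-- from (count of elements left of the window) to (count of elements not right of it).
lemma pv_filter_eq_drop_take (P : List (Int × String)) (a b : Int)
    (hs : List.Pairwise (fun x y : Int × String => x.1 ≤ y.1) P) :
    P.filter (fun q => decide (a ≤ q.1 ∧ q.1 ≤ b))
      = (P.drop (P.countP (fun q => decide (q.1 < a)))).take
          (P.countP (fun q => decide (q.1 ≤ b)) - P.countP (fun q => decide (q.1 < a))) := by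
  induction P with
  | nil => simp
  | cons x t ih =>
    rcases List.pairwise_cons.mp hs with ⟨hx, ht⟩
    have IH := ih ht
    rw [List.filter_cons, List.countP_cons, List.countP_cons]
    by_cases hxa : x.1 < a
    · have h1 : decide (x.1 < a) = true := by simp; omega
      have h2 : decide (a ≤ x.1 ∧ x.1 ≤ b) = false := by simp; omega
      by_cases hxb : x.1 ≤ b
      · have h3 : decide (x.1 ≤ b) = true := by simp; omega
        simp only [h1, h2, h3, if_true, Bool.false_eq_true, if_false]
        rw [IH]
        simp [List.drop_succ_cons, Nat.succ_sub_succ]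
      · have h3 : decide (x.1 ≤ b) = false := by simp; omega
        have hft : t.filter (fun q => decide (a ≤ q.1 ∧ q.1 ≤ b)) = [] :=
          List.filter_eq_nil_iff.mpr (fun y hy => by
            have := hx y hy; simp; omega)
        have hz : t.countP (fun q => decide (q.1 ≤ b)) = 0 :=
          List.countP_eq_zero.mpr (fun y hy => by
            have := hx y hy; simp; omega)
        simp only [h1, h2, h3, Bool.false_eq_true, if_false, if_true, hz]
        rw [hft]
        simp
    · have h1 : decide (x.1 < a) = false := by simp; omega
      have hz : t.countP (fun q => decide (q.1 < a)) = 0 :=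
        List.countP_eq_zero.mpr (fun y hy => by
          have := hx y hy; simp; omega)
      by_cases hxb : x.1 ≤ b
      · have h2 : decide (a ≤ x.1 ∧ x.1 ≤ b) = true := by simp; omega
        have h3 : decide (x.1 ≤ b) = true := by simp; omega
        simp only [h1, h2, h3, if_true, Bool.false_eq_true, if_false]
        rw [IH, hz]
        simp
      · have h2 : decide (a ≤ x.1 ∧ x.1 ≤ b) = false := by simp; omega
        have h3 : decide (x.1 ≤ b) = false := by simp; omega
        have hft : t.filter (fun q => decide (a ≤ q.1 ∧ q.1 ≤ b)) = [] :=
          List.filter_eq_nil_iff.mpr (fun y hy => by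
            have := hx y hy; simp; omega)
        have hz2 : t.countP (fun q => decide (q.1 ≤ b)) = 0 :=
          List.countP_eq_zero.mpr (fun y hy => by
            have := hx y hy; simp; omega)
        simp only [h1, h2, h3, Bool.false_eq_true, if_false, hz, hz2]
        rw [hft]
        simp

lemma pv_min?_sorted (l : List Int) (hs : List.Pairwise (fun a b : Int => a ≤ b) l) (h : l ≠ []) :
    PySem.List.min? l (fun x => x) = some (l.head h) := by
  obtain ⟨x, t, rfl⟩ := List.exists_cons_of_ne_nil h
  rcases List.pairwise_cons.mp hs with ⟨hx, _⟩
  cases hm : PySem.List.min? (x :: t) (fun y => y) with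
  | none => exact absurd ((PySem.List.min?_eq_none_iff _ _).mp hm) (by simp)
  | some m =>
    have hmem := PySem.List.min?_mem hm
    have hmin := PySem.List.min?_isMin hm
    have h1 : m ≤ x := hmin x (by simp)
    have h2 : x ≤ m := by
      rcases List.mem_cons.mp hmem with hmx | hmt
      · omega
      · exact hx m hmt
    rw [List.head_cons]
    exact congrArg some (le_antisymm h1 h2)

lemma pv_max?_sorted (l : List Int) (hs : List.Pairwise (fun a b : Int => a ≤ b) l) (h : l ≠ []) :
    PySem.List.max? l (fun x => x) = some (l.getLast h) := by
  have hall : ∀ y ∈ l, y ≤ l.getLast h := by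
    intro y hy
    rcases List.mem_iff_getElem.mp hy with ⟨i, hi, rfl⟩
    rw [List.getLast_eq_getElem]
    rcases Nat.lt_or_ge i (l.length - 1) with hlt | hge
    · exact List.pairwise_iff_getElem.mp hs i (l.length - 1) hi (by omega) hlt
    · have hieq : i = l.length - 1 := by omega
      subst hieq
      exact le_rfl
  cases hm : PySem.List.max? l (fun y => y) with
  | none => exact absurd ((PySem.List.max?_eq_none_iff _ _).mp hm) h
  | some m =>
    have hmem := PySem.List.max?_mem hm
    have hmax := PySem.List.max?_isMax hm
    exact congrArg some (le_antisymm (hall m hmem) (hmax _ (List.getLast_mem h)))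

lemma pv_foldl_congr_invariant {β γ : Type} (I : γ → Prop) (f g : γ → β → γ)
    (h : ∀ s x, I s → f s x = g s x ∧ I (f s x)) :
    ∀ (l : List β) (init : γ), I init → l.foldl f init = l.foldl g init := by
  intro l
  induction l with
  | nil => intro init _; rfl
  | cons x t ih =>
    intro init h0
    have hx := h init x h0
    simp only [List.foldl_cons, hx.1]
    rw [← hx.1]
    exact ih _ hx.2

lemma pv_stepA_inv (P : List (Int × String)) (w : Int) (st : Int × Int) (a : Int)
    (h0 : 0 ≤ st.1) : 0 ≤ (pvStepA P w st a).1 := by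
  unfold pvStepA
  dsimp only
  split
  · exact Int.natCast_nonneg _
  · exact h0

lemma pv_head_take_drop {α : Type} (P : List α) (lo hi : Nat) (h1 : lo < hi) (h2 : hi ≤ P.length)
    (hne : List.take (hi - lo) (List.drop lo P) ≠ []) :
    (List.take (hi - lo) (List.drop lo P)).head hne = P[lo]'(by omega) := by
  rw [List.head_eq_getElem, List.getElem_take, List.getElem_drop]
  simp

lemma pv_last_take_drop {α : Type} (P : List α) (lo hi : Nat) (h1 : lo < hi) (h2 : hi ≤ P.length)
    (hne : List.take (hi - lo) (List.drop lo P) ≠ []) :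
    (List.take (hi - lo) (List.drop lo P)).getLast hne = P[hi - 1]'(by omega) := by
  rw [List.getLast_eq_getElem]
  have hl : (List.take (hi - lo) (List.drop lo P)).length = hi - lo := by
    rw [List.length_take, List.length_drop]; omega
  rw [List.getElem_take, List.getElem_drop]
  have hidx : lo + ((List.take (hi - lo) (List.drop lo P)).length - 1) = hi - 1 := by
    rw [hl]; omega
  simp only [hidx]

lemma pv_step_eq (P : List (Int × String)) (w : Int)
    (hs : List.Pairwise (fun x y : Int × String => x.1 ≤ y.1) P)
    (st : Int × Int) (a : Int) (h0 : 0 ≤ st.1) :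
    pvStepA P w st a = pvStepB P (P.map (fun q => q.1)) (P.map (fun q => q.1)).length w st a := by
  have hsl : List.Pairwise (fun x y : Int => x ≤ y) (P.map (fun q => q.1)) :=
    List.pairwise_map.mpr hs
  have hlo : pvLB (P.map (fun q => q.1)) a 0 (P.map (fun q => q.1)).length
      = P.countP (fun q => decide (q.1 < a)) := by
    rw [pvLB_eq _ _ hsl, List.countP_map]; rfl
  have hhi : pvUB (P.map (fun q => q.1)) (a + w) 0 (P.map (fun q => q.1)).length
      = P.countP (fun q => decide (q.1 ≤ a + w)) := by
    rw [pvUB_eq _ _ hsl, List.countP_map]; rfl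
  have hhilen : P.countP (fun q => decide (q.1 ≤ a + w)) ≤ P.length := List.countP_le_length
  have hfilter := pv_filter_eq_drop_take P a (a + w) hs
  simp only [pvStepA, pvStepB, hlo, hhi]
  rw [PySem.List.slice_natCast, ← hfilter]
  rw [PySem.List.foldl_ite_eq_foldl_filter (p := fun q : Int × String => a ≤ q.1 ∧ q.1 ≤ a + w)
    (f := fun s q => PySem.Set.add s (PySem.Str.lower q.2))]
  rw [PySem.List.foldl_append_ite (p := fun q : Int × String => a ≤ q.1 ∧ q.1 ≤ a + w)
    (f := fun q => q.1)]
  have hscore : PySem.Set.ofList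
      ((P.filter (fun q => decide (a ≤ q.1 ∧ q.1 ≤ a + w))).map (fun q => PySem.Str.lower q.2))
      = (P.filter (fun q => decide (a ≤ q.1 ∧ q.1 ≤ a + w))).foldl
          (fun s q => PySem.Set.add s (PySem.Str.lower q.2)) PySem.Set.empty := by
    rw [PySem.Set.ofList_eq_foldl, List.foldl_map]
    rfl
  rw [hscore]
  simp only [List.nil_append]
  set clo := List.countP (fun q => decide (q.1 < a)) P with hclo
  set chi := List.countP (fun q => decide (q.1 ≤ a + w)) P with hchi
  split_ifs with hgt
  · -- update branch: score > best ≥ 0, so the window slice is non-empty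
    have hFne : P.filter (fun q => decide (a ≤ q.1 ∧ q.1 ≤ a + w)) ≠ [] := by
      intro hF
      rw [hF] at hgt
      simp [PySem.Set.empty] at hgt
      omega
    have hmne : (P.filter (fun q => decide (a ≤ q.1 ∧ q.1 ≤ a + w))).map (fun q => q.1) ≠ [] := by
      simpa [List.map_eq_nil_iff] using hFne
    have hTDne : List.take (chi - clo) (List.drop clo P) ≠ [] := by
      rw [← hfilter]; exact hFne
    have hlh : clo < chi := by
      by_contra hc
      apply hFne
      rw [hfilter]
      have hz : chi - clo = 0 := by omega
      rw [hz, List.take_zero]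
    have hloP : clo < P.length := by
      by_contra hc
      apply hFne
      rw [hfilter]
      have hd : List.drop clo P = [] := List.drop_eq_nil_iff.mpr (by omega)
      rw [hd, List.take_nil]
    have hFpair : List.Pairwise (fun x y : Int => x ≤ y)
        ((P.filter (fun q => decide (a ≤ q.1 ∧ q.1 ≤ a + w))).map (fun q => q.1)) :=
      List.pairwise_map.mpr (List.Pairwise.sublist List.filter_sublist hs)
    rw [pv_min?_sorted _ hFpair hmne, pv_max?_sorted _ hFpair hmne]
    rw [List.head_map, List.getLast_map]
    simp only [Option.getD_some]
    simp only [hfilter]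
    rw [pv_head_take_drop P clo chi hlh hhilen, pv_last_take_drop P clo chi hlh hhilen]
    rw [List.getD_eq_getElem _ _ (by rw [List.length_map]; exact hloP),
        List.getD_eq_getElem _ _ (by rw [List.length_map]; omega)]
    rw [List.getElem_map, List.getElem_map]
  · rfl

lemma pv_fold_eq (P : List (Int × String)) (w : Int)
    (hs : List.Pairwise (fun x y : Int × String => x.1 ≤ y.1) P) (init : Int × Int)
    (h0 : 0 ≤ init.1) :
    P.foldl (fun st q => pvStepA P w st q.1) init
      = P.foldl (fun st q => pvStepB P (P.map (fun q => q.1)) (P.map (fun q => q.1)).length w st q.1) init := by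
  apply pv_foldl_congr_invariant (I := fun st => 0 ≤ st.1)
  · intro s x hI
    exact ⟨pv_step_eq P w hs s x.1 hI, pv_stepA_inv P w s x.1 hI⟩
  · exact h0

-- ===== VERDICT (by name: the statement is the Claim_ definition above) =====
theorem extract_section_from_text_py_spec : Claim_equal_extract_section_from_text_py := by
  intro full_text keywords context_chars _dom
  unfold Spec_extract_section_from_text_py
  unfold extract_section_from_text_py extract_section_from_text_py_alt
  split
  · rfl
  · dsimp only
    split
    · rfl
    · rw [pv_fold_eq _ context_chars
        (PySem.List.sorted_pairwise _ _) _ le_rfl]
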